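-- pv_equiv track=rewrite | github.com/cspyksma/Job_tracking | extraction/extract_fields.py | _company_from_domain
-- ===== SOURCE A (Python) =====
-- _DOMAIN_NOISE_PREFIXES = {
--     "mail", "noreply", "no-reply", "notifications", "notification",
--     "alerts", "alert", "info", "support", "do-not-reply", "donotreply",
--     "mailer", "smtp", "bounce", "auto", "news", "reply", "replies",
--     "email", "emails", "hello", "hi", "contact", "team",
-- }
--
-- def _company_from_domain(domain: str) -> str:
--     """Return a readable company name from an email sender domain.
--
--     Strips TLD and infrastructure noise prefixes, then picks the longest
--     remaining label as the most meaningful company identifier.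
--     e.g. "sap.hr.ext.seagate.com" → "Seagate"
--     """
--     if not domain:
--         return ""
--     labels = domain.lower().split(".")
--     if len(labels) >= 2:
--         labels = labels[:-1]  # strip TLD
--     # Strip leading noise prefixes.
--     while labels and labels[0] in _DOMAIN_NOISE_PREFIXES:
--         labels = labels[1:]
--     if not labels:
--         return ""
--     # Pick the longest label that isn't a known noise prefix.
--     best = max(
--         (l for l in labels if l not in _DOMAIN_NOISE_PREFIXES),
--         key=len,
--         default=labels[0],
--     )
--     return best.title()
-- ===== SOURCE B (Python) =====
-- _DOMAIN_NOISE_PREFIXES = {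
--     "mail", "noreply", "no-reply", "notifications", "notification",
--     "alerts", "alert", "info", "support", "do-not-reply", "donotreply",
--     "mailer", "smtp", "bounce", "auto", "news", "reply", "replies",
--     "email", "emails", "hello", "hi", "contact", "team",
-- }
--
-- def _company_from_domain(domain: str) -> str:
--     """Single character-level scan: never materializes the label list.
--
--     Walks the string once, lowercasing as it goes, cutting labels at '.'
--     on the fly; a completed label is considered as best candidate unless
--     it is a noise prefix (first longest wins).  The label after the last
--     dot is the TLD and is dropped; if no dot was seen the sole label is
--     kept (mirrors the len>=2 TLD-strip rule)."""
--     best = None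
--     cur = []
--     seen_dot = False
--     for ch in domain:
--         c = ch.lower()
--         if c == '.':
--             seen_dot = True
--             label = ''.join(cur)
--             cur = []
--             if label not in _DOMAIN_NOISE_PREFIXES and (best is None or len(label) > len(best)):
--                 best = label
--         else:
--             cur.append(c)
--     if not seen_dot:
--         label = ''.join(cur)
--         if label not in _DOMAIN_NOISE_PREFIXES and (best is None or len(label) > len(best)):
--             best = label
--     return best.title() if best is not None else ""
-- ===== Notes on version B (the rewrite author's own statement) =====
-- stated objective: alternative
-- what changed: Replaced A's staged pipeline (split into a label list, slice off the TLD, while-loop stripping leading noise labels, then max with default over a filtered generator) by one character-level scan of the string that cuts labels at dots on the fly and keeps the first longest non-noise label in an accumulator; no label list, no slicing loop-free pass, no max call.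
import Mathlib
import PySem

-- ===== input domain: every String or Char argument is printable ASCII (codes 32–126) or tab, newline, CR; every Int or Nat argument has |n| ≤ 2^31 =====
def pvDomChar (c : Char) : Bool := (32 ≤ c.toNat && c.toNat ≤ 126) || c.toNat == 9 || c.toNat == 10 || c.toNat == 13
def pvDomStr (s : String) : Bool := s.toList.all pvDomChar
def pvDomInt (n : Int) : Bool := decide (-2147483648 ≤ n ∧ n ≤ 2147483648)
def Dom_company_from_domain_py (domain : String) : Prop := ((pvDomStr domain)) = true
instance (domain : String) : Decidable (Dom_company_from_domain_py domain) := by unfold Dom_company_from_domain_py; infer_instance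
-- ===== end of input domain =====

-- B replaces A's staged pipeline (split into labels, TLD slice, leading-noise while-loop,
-- max-with-default over a filtered generator) by ONE character-level scan that cuts labels
-- at dots on the fly and keeps the first longest non-noise label (objective: alternative).

-- the module constant _DOMAIN_NOISE_PREFIXES (shared by both Pythons), as a list of char-lists
def pvNoise : List (List Char) :=
  ["mail".toList, "noreply".toList, "no-reply".toList, "notifications".toList, "notification".toList,
   "alerts".toList, "alert".toList, "info".toList, "support".toList, "do-not-reply".toList, "donotreply".toList,
   "mailer".toList, "smtp".toList, "bounce".toList, "auto".toList, "news".toList, "reply".toList, "replies".toList,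
   "email".toList, "emails".toList, "hello".toList, "hi".toList, "contact".toList, "team".toList]

-- str.title on the printable-ASCII domain: an alphabetic char is uppercased after a
-- non-alphabetic (or initial) position, lowercased otherwise; other chars pass through.
-- Hand-ported (PySem has no title); exact for ASCII, where cased = alphabetic.
def pvTitleGo : List Char → Bool → List Char
  | [], _ => []
  | c :: cs, prevAlpha =>
    (if PySem.Chars.isalpha c then
       (if prevAlpha then PySem.Chars.lowerChar c else PySem.Chars.upperChar c)
     else c) :: pvTitleGo cs (PySem.Chars.isalpha c)

def pvTitle (l : List Char) : List Char := pvTitleGo l false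

-- ===== PORT A =====
-- the 'while labels and labels[0] in NOISE: labels = labels[1:]' loop
def pvStrip : List (List Char) → List (List Char)
  | [] => []
  | l :: rest => if l ∈ pvNoise then pvStrip rest else l :: rest

def company_from_domain_py (domain : String) : String :=
  if domain.toList = [] then "" else
  let labels0 := PySem.Chars.splitOn (PySem.Chars.lower domain.toList) ['.']
  let labels1 := if labels0.length ≥ 2 then PySem.List.slice labels0 none (some (-1)) else labels0
  match pvStrip labels1 with
  | [] => ""
  | l0 :: t =>
    String.ofList (pvTitle (PySem.List.maxD ((l0 :: t).filter (fun l => decide (l ∉ pvNoise))) List.length l0))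

-- ===== PORT B =====
-- 'if label not in NOISE and (best is None or len(label) > len(best)): best = label'
def pvConsider (label : List Char) (best : Option (List Char)) : Option (List Char) :=
  if label ∈ pvNoise then best
  else match best with
    | none => some label
    | some b => if b.length < label.length then some label else best

-- the for-loop over the characters, state = (cur, best, seen_dot); the trailing
-- 'if not seen_dot: consider(cur)' is the base case
def pvScan : List Char → List Char → Option (List Char) → Bool → Option (List Char)
  | [], cur, best, seenDot => if seenDot then best else pvConsider cur best
  | c :: cs, cur, best, seenDot =>
    let lc := PySem.Chars.lowerChar c
    if lc = '.' then pvScan cs [] (pvConsider cur best) true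
    else pvScan cs (cur ++ [lc]) best seenDot

def company_from_domain_py_alt (domain : String) : String :=
  match pvScan domain.toList [] none false with
  | none => ""
  | some best => String.ofList (pvTitle best)

-- ===== PRECONDITION & SPEC =====
def Spec_company_from_domain_py (domain : String) (out : String) : Prop := out = company_from_domain_py_alt domain
instance (domain : String) (out : String) : Decidable (Spec_company_from_domain_py domain out) := by unfold Spec_company_from_domain_py; infer_instance

-- ===== CLAIM (what is proved, stated in full; the proofs are below) =====
def Claim_equal_company_from_domain_py : Prop := ∀ (domain : String), Dom_company_from_domain_py domain → Spec_company_from_domain_py domain (company_from_domain_py domain)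

-- ===== LEMMAS AND PROOFS =====

-- reference recursion for split-on-dot: splAux l cur = labels of (cur.reverse ++ l)
def splAux : List Char → List Char → List (List Char)
  | [], cur => [cur.reverse]
  | c :: r, cur => if c = '.' then cur.reverse :: splAux r [] else splAux r (c :: cur)

lemma go_spec : ∀ (l : List Char) (fuel : Nat) (cur : List Char) (acc : List (List Char)),
    l.length < fuel →
    PySem.Chars.splitOn.go ['.'] fuel l cur acc = acc.reverse ++ splAux l cur := by
  intro l
  induction l with
  | nil =>
    intro fuel cur acc h
    match fuel with
    | f + 1 => simp [PySem.Chars.splitOn.go, splAux]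
  | cons c r ih =>
    intro fuel cur acc h
    match fuel with
    | f + 1 =>
      by_cases hc : c = '.'
      · subst hc
        rw [show PySem.Chars.splitOn.go ['.'] (f+1) ('.' :: r) cur acc
              = PySem.Chars.splitOn.go ['.'] f r [] (cur.reverse :: acc) from by
            simp [PySem.Chars.splitOn.go, List.isPrefixOf]]
        rw [ih f [] (cur.reverse :: acc) (by simp at h; omega)]
        simp [splAux]
      · rw [show PySem.Chars.splitOn.go ['.'] (f+1) (c :: r) cur acc
              = PySem.Chars.splitOn.go ['.'] f r (c :: cur) acc from by
            simp [PySem.Chars.splitOn.go, List.isPrefixOf, Ne.symm hc]]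
        rw [ih f (c :: cur) acc (by simp at h; omega)]
        simp [splAux, hc]

lemma splitOn_eq_splAux (s : List Char) : PySem.Chars.splitOn s ['.'] = splAux s [] := by
  simp [PySem.Chars.splitOn, go_spec s (s.length + 1) [] [] (by omega)]

lemma splAux_ne_nil (l cur) : splAux l cur ≠ [] := by
  induction l generalizing cur with
  | nil => simp [splAux]
  | cons c r ih => by_cases hc : c = '.' <;> simp [splAux, hc, ih]

lemma splAux_length (l cur) : (splAux l cur).length = l.count '.' + 1 := by
  induction l generalizing cur with
  | nil => simp [splAux]
  | cons c r ih => by_cases hc : c = '.' <;> simp [splAux, hc, ih]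

lemma slice_neg_one (l : List (List Char)) : PySem.List.slice l none (some (-1)) = l.dropLast := by
  simp [PySem.List.slice, List.dropLast_eq_take]

-- running best over a list of labels
def bestOf (L : List (List Char)) (best : Option (List Char)) : Option (List Char) :=
  L.foldl (fun b l => pvConsider l b) best

lemma bestOf_eq_max?_filter (L : List (List Char)) :
    bestOf L none = PySem.List.max? (L.filter (fun l => decide (l ∉ pvNoise))) List.length := by
  unfold bestOf PySem.List.max?
  rw [List.foldl_filter]
  congr 1
  funext b l
  by_cases h : l ∈ pvNoise <;> cases b <;> simp [pvConsider, h]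

lemma scan_true (cs : List Char) : ∀ (cur : List Char) (best : Option (List Char)),
    pvScan cs cur best true
      = bestOf ((splAux (cs.map PySem.Chars.lowerChar) cur.reverse).dropLast) best := by
  induction cs with
  | nil => intro cur best; simp [pvScan, splAux, bestOf]
  | cons c cs ih =>
    intro cur best
    by_cases hc : PySem.Chars.lowerChar c = '.'
    · have hne := splAux_ne_nil (cs.map PySem.Chars.lowerChar) []
      rw [show pvScan (c :: cs) cur best true = pvScan cs [] (pvConsider cur best) true from by
            simp [pvScan, hc]]
      rw [ih]
      have hsp : splAux ((c :: cs).map PySem.Chars.lowerChar) cur.reverse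
          = cur :: splAux (cs.map PySem.Chars.lowerChar) [] := by
        simp [splAux, hc]
      rw [hsp, List.dropLast_cons_of_ne_nil hne]
      simp [bestOf]
    · rw [show pvScan (c :: cs) cur best true
            = pvScan cs (cur ++ [PySem.Chars.lowerChar c]) best true from by
          simp [pvScan, hc]]
      rw [ih]
      have hsp : splAux ((c :: cs).map PySem.Chars.lowerChar) cur.reverse
          = splAux (cs.map PySem.Chars.lowerChar) (PySem.Chars.lowerChar c :: cur.reverse) := by
        simp [splAux, hc]
      rw [hsp]
      simp

lemma scan_false (cs : List Char) : ∀ (cur : List Char) (best : Option (List Char)),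
    pvScan cs cur best false
      = if '.' ∈ cs.map PySem.Chars.lowerChar
        then bestOf ((splAux (cs.map PySem.Chars.lowerChar) cur.reverse).dropLast) best
        else bestOf (splAux (cs.map PySem.Chars.lowerChar) cur.reverse) best := by
  induction cs with
  | nil => intro cur best; simp [pvScan, splAux, bestOf]
  | cons c cs ih =>
    intro cur best
    by_cases hc : PySem.Chars.lowerChar c = '.'
    · have hne := splAux_ne_nil (cs.map PySem.Chars.lowerChar) []
      have hdot : '.' ∈ (c :: cs).map PySem.Chars.lowerChar := by simp [hc]
      rw [show pvScan (c :: cs) cur best false = pvScan cs [] (pvConsider cur best) true from by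
            simp [pvScan, hc]]
      rw [scan_true, if_pos hdot]
      have hsp : splAux ((c :: cs).map PySem.Chars.lowerChar) cur.reverse
          = cur :: splAux (cs.map PySem.Chars.lowerChar) [] := by
        simp [splAux, hc]
      rw [hsp, List.dropLast_cons_of_ne_nil hne]
      simp [bestOf]
    · have hmem : ('.' ∈ (c :: cs).map PySem.Chars.lowerChar)
          ↔ ('.' ∈ cs.map PySem.Chars.lowerChar) := by
        simp [List.mem_cons, Ne.symm hc]
      rw [show pvScan (c :: cs) cur best false
            = pvScan cs (cur ++ [PySem.Chars.lowerChar c]) best false from by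
          simp [pvScan, hc]]
      rw [ih]
      have hsp : splAux ((c :: cs).map PySem.Chars.lowerChar) cur.reverse
          = splAux (cs.map PySem.Chars.lowerChar) (PySem.Chars.lowerChar c :: cur.reverse) := by
        simp [splAux, hc]
      by_cases hd : '.' ∈ cs.map PySem.Chars.lowerChar
      · rw [if_pos hd, if_pos (hmem.2 hd), hsp]
        simp
      · rw [if_neg hd, if_neg (fun h => hd (hmem.1 h)), hsp]
        simp

-- the stripped leading labels are all noise, so the non-noise filter does not see them
lemma pvStrip_filter (L : List (List Char)) :
    (pvStrip L).filter (fun l => decide (l ∉ pvNoise)) = L.filter (fun l => decide (l ∉ pvNoise)) := by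
  induction L with
  | nil => rfl
  | cons l rest ih =>
    by_cases h : l ∈ pvNoise
    · have h1 : pvStrip (l :: rest) = pvStrip rest := by simp [pvStrip, h]
      have h2 : (decide (l ∉ pvNoise)) = false := by simp [h]
      rw [h1, ih, List.filter_cons, h2]
      simp
    · simp [pvStrip, h]

-- the head surviving the strip loop is not noise
lemma pvStrip_head_not_noise (L : List (List Char)) (l0 : List Char) (t : List (List Char))
    (h : pvStrip L = l0 :: t) : l0 ∉ pvNoise := by
  induction L with
  | nil => simp [pvStrip] at h
  | cons l rest ih =>
    by_cases hl : l ∈ pvNoise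
    · simp [pvStrip, hl] at h; exact ih h
    · simp [pvStrip, hl] at h; rw [← h.1]; exact hl

-- A's strip + maxD over a filter equals max? over the unstripped filter
lemma core_eq (L : List (List Char)) :
    (match pvStrip L with
     | [] => ""
     | l0 :: t =>
       String.ofList (pvTitle (PySem.List.maxD ((l0 :: t).filter (fun l => decide (l ∉ pvNoise))) List.length l0))) =
    (match PySem.List.max? (L.filter (fun l => decide (l ∉ pvNoise))) List.length with
     | none => ""
     | some best => String.ofList (pvTitle best)) := by
  have hf := pvStrip_filter L
  cases hs : pvStrip L with
  | nil =>
    rw [hs] at hf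
    simp only [List.filter_nil] at hf
    rw [← hf]
    rfl
  | cons l0 t =>
    rw [hs] at hf
    have hl0 : l0 ∉ pvNoise := pvStrip_head_not_noise L l0 t hs
    have hfc : (l0 :: t).filter (fun l => decide (l ∉ pvNoise))
        = l0 :: t.filter (fun l => decide (l ∉ pvNoise)) := by
      simp [hl0]
    rw [← hf]
    cases hm : PySem.List.max? ((l0 :: t).filter (fun l => decide (l ∉ pvNoise))) List.length with
    | none =>
      rw [PySem.List.max?_eq_none_iff] at hm
      rw [hfc] at hm
      exact absurd hm (List.cons_ne_nil _ _)
    | some m =>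
      simp only [PySem.List.maxD]
      rw [hm, Option.getD_some]

-- ===== VERDICT (by name: the statement is the Claim_ definition above) =====
theorem company_from_domain_py_spec : Claim_equal_company_from_domain_py := by
  intro domain _
  unfold Spec_company_from_domain_py company_from_domain_py company_from_domain_py_alt
  by_cases hd : domain.toList = []
  · rw [hd]
    simp only [reduceIte]
    have : pvScan [] [] none false = some [] := by decide
    rw [this]
    rfl
  · simp only [hd, if_false]
    rw [core_eq]
    have hscan := scan_false domain.toList [] none
    simp only [List.reverse_nil] at hscan
    rw [hscan]
    have hlower : PySem.Chars.lower domain.toList = domain.toList.map PySem.Chars.lowerChar := rfl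
    rw [hlower, splitOn_eq_splAux]
    have hlen : ((splAux (domain.toList.map PySem.Chars.lowerChar) []).length ≥ 2)
        ↔ ('.' ∈ domain.toList.map PySem.Chars.lowerChar) := by
      rw [splAux_length]
      rw [← List.count_pos_iff]
      omega
    by_cases hdot : '.' ∈ domain.toList.map PySem.Chars.lowerChar
    · rw [if_pos hdot, if_pos (hlen.2 hdot), slice_neg_one, bestOf_eq_max?_filter]
    · rw [if_neg hdot, if_neg (fun h => hdot (hlen.1 h)), bestOf_eq_max?_filter]
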